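-- pv_equiv track=rewrite | github.com/sean-hart/advent2020 | jerb/day5/day5-part1.py | derive_position
-- ===== SOURCE A (Python) =====
-- ADVANCE_TOKENS = {'B', 'R'}
--
-- def derive_position(encoding):
--     power = len(encoding) - 1
--     total = 0
--     position = 0
--     for c in encoding:
--         if c in ADVANCE_TOKENS:
--            total += 2 ** power
--         power -= 1
--
--     return total
-- ===== SOURCE B (Python) =====
-- ADVANCE_TOKENS = {'B', 'R'}
--
-- def derive_position(encoding):
--     return int('0' + ''.join('1' if c in ADVANCE_TOKENS else '0' for c in encoding), 2)
-- ===== Notes on version B (the rewrite author's own statement) =====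
-- stated objective: idiomatic
-- what changed: B replaces the manual power/total accumulator loop with mapping each character to a binary digit and one base-2 int() conversion (a '0' prefix keeps the empty input at 0).
import Mathlib
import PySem

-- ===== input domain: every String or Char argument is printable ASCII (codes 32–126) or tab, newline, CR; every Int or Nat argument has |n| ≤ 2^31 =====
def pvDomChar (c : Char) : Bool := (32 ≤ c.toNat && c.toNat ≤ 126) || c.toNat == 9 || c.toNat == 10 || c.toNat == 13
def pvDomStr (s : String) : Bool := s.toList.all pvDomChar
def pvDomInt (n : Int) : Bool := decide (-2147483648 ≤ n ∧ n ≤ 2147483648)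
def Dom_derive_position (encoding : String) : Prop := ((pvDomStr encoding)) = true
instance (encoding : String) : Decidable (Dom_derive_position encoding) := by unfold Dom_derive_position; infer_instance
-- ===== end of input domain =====

-- B replaces A's manual power/total accumulator with per-character binary digits joined and one base-2 conversion (idiomatic, same cost).


-- ===== PORT A =====
-- loop state: (total, power); '2 ** power' is ported as 2 ^ st.2.toNat, exact because
-- power = remaining length - 1 ≥ 0 whenever the exponent is used.
def derive_position (encoding : String) : Int :=
  (encoding.toList.foldl
    (fun (st : Int × Int) c =>
      (if c = 'B' ∨ c = 'R' then st.1 + 2 ^ st.2.toNat else st.1, st.2 - 1))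
    (0, (encoding.toList.length : Int) - 1)).1

-- ===== PORT B =====
-- int(s, 2) is hand-ported as a left fold acc*2 + digit; exact since s consists of '0'/'1' only.
def derive_position_alt (encoding : String) : Int :=
  let s : List Char := '0' :: encoding.toList.map (fun c => if c = 'B' ∨ c = 'R' then '1' else '0')
  s.foldl (fun a c => 2 * a + (if c = '1' then 1 else 0)) 0

-- ===== PRECONDITION & SPEC =====
def Spec_derive_position (encoding : String) (out : Int) : Prop := out = derive_position_alt encoding
instance (encoding : String) (out : Int) : Decidable (Spec_derive_position encoding out) := by unfold Spec_derive_position; infer_instance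

-- ===== CLAIM (what is proved, stated in full; the proofs are below) =====
def Claim_equal_derive_position : Prop := ∀ (encoding : String), Dom_derive_position encoding → Spec_derive_position encoding (derive_position encoding)

-- ===== LEMMAS AND PROOFS =====
def pvBit (c : Char) : Int := if c = 'B' ∨ c = 'R' then 1 else 0

lemma binval_shift (cs : List Char) : ∀ (a : Int),
    cs.foldl (fun a c => 2 * a + pvBit c) a
      = a * 2 ^ cs.length + cs.foldl (fun a c => 2 * a + pvBit c) 0 := by
  induction cs with
  | nil => intro a; simp
  | cons c cs ih =>
    intro a
    simp only [List.foldl_cons, List.length_cons]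
    rw [ih (2 * a + pvBit c), ih (2 * 0 + pvBit c)]
    ring

lemma afold_eq (cs : List Char) : ∀ (t : Int),
    (cs.foldl
      (fun (st : Int × Int) c =>
        (if c = 'B' ∨ c = 'R' then st.1 + 2 ^ st.2.toNat else st.1, st.2 - 1))
      (t, (cs.length : Int) - 1)).1
    = t + cs.foldl (fun a c => 2 * a + pvBit c) 0 := by
  induction cs with
  | nil => intro t; simp
  | cons c cs ih =>
    intro t
    have hp : ((c :: cs).length : Int) - 1 = (cs.length : Int) := by
      simp
    have htn : ((cs.length : Int)).toNat = cs.length := Int.toNat_natCast _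
    simp only [List.foldl_cons, hp, htn]
    have hstep : ((if c = 'B' ∨ c = 'R' then t + 2 ^ cs.length else t : Int),
        (cs.length : Int) - 1)
        = ((t + pvBit c * 2 ^ cs.length : Int), (cs.length : Int) - 1) := by
      unfold pvBit; split_ifs <;> ring_nf
    rw [hstep, ih (t + pvBit c * 2 ^ cs.length)]
    rw [binval_shift cs (2 * 0 + pvBit c)]
    ring

lemma bfold_map (cs : List Char) : ∀ (a : Int),
    (cs.map (fun c => if c = 'B' ∨ c = 'R' then '1' else '0')).foldl
        (fun a c => 2 * a + (if c = '1' then 1 else 0)) a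
      = cs.foldl (fun a c => 2 * a + pvBit c) a := by
  induction cs with
  | nil => intro a; simp
  | cons c cs ih =>
    intro a
    simp only [List.map_cons, List.foldl_cons, ih]
    unfold pvBit
    split_ifs <;> simp_all

-- ===== VERDICT (by name: the statement is the Claim_ definition above) =====
theorem derive_position_spec : Claim_equal_derive_position := by
  intro encoding _
  unfold Spec_derive_position derive_position derive_position_alt
  simp only [List.foldl_cons]
  rw [afold_eq, bfold_map]
  norm_num
  rfl
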